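-- pv_equiv track=rewrite | github.com/Aashiq1/TripGenie | app/services/amadeus_hotels.py | generate_room_summary
-- ===== SOURCE A (Python) =====
-- from typing import List, Dict, Optional
--
-- def generate_room_summary(assignments: List[Dict]) -> str:
--     """Generate human-readable summary of room assignments."""
--     room_counts = {}
--     for assignment in assignments:
--         room_type = assignment['room_type']
--         room_counts[room_type] = room_counts.get(room_type, 0) + 1
--
--     summary_parts = []
--     for room_type, count in sorted(room_counts.items()):
--         if count == 1:
--             summary_parts.append(f"1 {room_type}")
--         else:
--             summary_parts.append(f"{count} {room_type}s")
--
--     return ", ".join(summary_parts)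
-- ===== SOURCE B (Python) =====
-- def generate_room_summary(assignments):
--     """Generate human-readable summary of room assignments."""
--     types = sorted([a['room_type'] for a in assignments])
--     parts = []
--     i = 0
--     n = len(types)
--     while i < n:
--         j = i + 1
--         while j < n and types[j] == types[i]:
--             j += 1
--         count = j - i
--         if count == 1:
--             parts.append(f"1 {types[i]}")
--         else:
--             parts.append(f"{count} {types[i]}s")
--         i = j
--     return ", ".join(parts)
-- ===== Notes on version B (the rewrite author's own statement) =====
-- stated objective: alternative
-- what changed: B drops A's count dictionary entirely: it collects the raw room_type list, sorts it, and run-length-scans adjacent equal entries to emit each summary part in already-sorted order.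
import Mathlib
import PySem

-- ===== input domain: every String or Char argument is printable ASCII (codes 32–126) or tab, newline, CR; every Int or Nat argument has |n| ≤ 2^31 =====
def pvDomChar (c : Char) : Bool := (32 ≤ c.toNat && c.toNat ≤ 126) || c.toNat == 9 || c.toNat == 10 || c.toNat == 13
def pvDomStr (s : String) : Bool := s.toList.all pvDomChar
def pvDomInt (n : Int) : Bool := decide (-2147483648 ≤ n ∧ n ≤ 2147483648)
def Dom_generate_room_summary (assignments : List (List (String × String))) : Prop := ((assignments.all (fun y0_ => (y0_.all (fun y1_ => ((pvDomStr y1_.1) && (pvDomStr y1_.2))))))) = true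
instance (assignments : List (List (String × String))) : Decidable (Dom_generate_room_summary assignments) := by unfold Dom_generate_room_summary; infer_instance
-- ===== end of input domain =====

-- B replaces A's count dictionary by sorting the raw room-type list and run-length-scanning adjacent equal entries (objective: alternative, same output).

-- assignment['room_type'] (dict lookup; none = KeyError, excluded by Pre_)
def pvLookup (a : List (String × String)) : Option String := (PySem.Dict.mk a).get? "room_type"

-- ===== PORT A =====
def generate_room_summary (assignments : List (List (String × String))) : String :=
  let counts? : Option (PySem.Dict String Int) :=
    assignments.foldl
      (fun acc a => acc.bind (fun d => (pvLookup a).map (fun rt => d.insert rt (d.getD rt 0 + 1))))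
      (some PySem.Dict.empty)
  match counts? with
  | none => ""  -- KeyError in Python; outside Pre_
  | some counts =>
    let parts : List String :=
      (PySem.List.sorted2 counts.items (fun p => p.1) (fun p => p.2)).foldl
        (fun acc p =>
          if p.2 == 1 then acc ++ ["1 " ++ p.1]
          else acc ++ [PySem.Int.toStr p.2 ++ " " ++ p.1 ++ "s"]) []
    PySem.Str.join ", " parts

-- ===== PORT B =====
-- the inner while-loop scan of Source B: consume one run of equal leading elements per step
def pvRunsB : List String → List String
  | [] => []
  | x :: t =>
    let count : Int := 1 + (t.takeWhile (fun y => y == x)).length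
    (if count == 1 then "1 " ++ x else PySem.Int.toStr count ++ " " ++ x ++ "s")
      :: pvRunsB (t.dropWhile (fun y => y == x))
termination_by s => s.length
decreasing_by
  have := List.length_dropWhile_le (fun y => y == x) t
  simp only [List.length_cons]
  omega

def generate_room_summary_alt (assignments : List (List (String × String))) : String :=
  let types? : Option (List String) :=
    assignments.foldl
      (fun acc a => acc.bind (fun l => (pvLookup a).map (fun rt => l ++ [rt])))
      (some [])
  match types? with
  | none => ""  -- KeyError in Python; outside Pre_
  | some types =>
    PySem.Str.join ", " (pvRunsB (PySem.List.sorted types (fun x => x) false))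

-- ===== PRECONDITION & SPEC =====
-- Pre_ excludes exactly the inputs on which Python A raises KeyError: an assignment without a 'room_type' key.
def Pre_generate_room_summary (assignments : List (List (String × String))) : Prop :=
  (assignments.all (fun a => a.any (fun p => p.1 == "room_type"))) = true
instance (assignments : List (List (String × String))) : Decidable (Pre_generate_room_summary assignments) := by
  unfold Pre_generate_room_summary; infer_instance

def pvWitness_generate_room_summary : (List (List (String × String))) :=
  [[("room_type", "single")], [("room_type", "suite"), ("floor", "2")], [("room_type", "single")]]

def Spec_generate_room_summary (assignments : List (List (String × String))) (out : String) : Prop := out = generate_room_summary_alt assignments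
instance (assignments : List (List (String × String))) (out : String) : Decidable (Spec_generate_room_summary assignments out) := by unfold Spec_generate_room_summary; infer_instance

-- ===== CLAIM (what is proved, stated in full; the proofs are below) =====
def Claim_equal_generate_room_summary : Prop := ∀ (assignments : List (List (String × String))), Dom_generate_room_summary assignments → Pre_generate_room_summary assignments → Spec_generate_room_summary assignments (generate_room_summary assignments)

-- ===== LEMMAS AND PROOFS =====

def pvFmt (k : String) (c : Int) : String :=
  if c == 1 then "1 " ++ k else PySem.Int.toStr c ++ " " ++ k ++ "s"

def pvTypes (assignments : List (List (String × String))) : List String :=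
  assignments.map (fun a => (pvLookup a).getD "")

lemma pv_bindfold {β : Type} (step : β → String → β) :
    ∀ (l : List (List (String × String))) (b : β),
      (∀ a ∈ l, (pvLookup a).isSome) →
      l.foldl (fun acc a => acc.bind (fun s => (pvLookup a).map (step s))) (some b)
        = some ((l.map (fun a => (pvLookup a).getD "")).foldl step b) := by
  intro l
  induction l with
  | nil => intro b _; simp
  | cons a rest ih =>
    intro b h
    have ha := h a (by simp)
    obtain ⟨rt, hrt⟩ := Option.isSome_iff_exists.mp ha
    simp only [List.foldl_cons, List.map_cons, Option.bind_some, hrt, Option.map_some,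
      Option.getD_some]
    exact ih (step b rt) (fun a' ha' => h a' (by simp [ha']))

lemma pv_insertBy_congr {α : Type} (f g : α → α → Bool) (x : α) :
    ∀ (ys : List α), (∀ y ∈ ys, f x y = g x y) →
      PySem.List.insertBy f x ys = PySem.List.insertBy g x ys := by
  intro ys
  induction ys with
  | nil => intro _; rfl
  | cons y ys ih =>
    intro h
    simp only [PySem.List.insertBy, h y (by simp)]
    by_cases hg : g x y = true
    · simp [hg]
    · simp only [Bool.not_eq_true] at hg
      simp [hg, ih (fun z hz => h z (by simp [hz]))]

lemma pv_foldl_insertBy_congr {α : Type} (f g : α → α → Bool) :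
    ∀ (xs acc : List α), (∀ x ∈ xs, ∀ y ∈ acc, f x y = g x y) →
      xs.Pairwise (fun a b => f b a = g b a) →
      xs.foldl (fun acc x => PySem.List.insertBy f x acc) acc
        = xs.foldl (fun acc x => PySem.List.insertBy g x acc) acc := by
  intro xs
  induction xs with
  | nil => intro acc _ _; rfl
  | cons x rest ih =>
    intro acc hacc hpw
    have hx : PySem.List.insertBy f x acc = PySem.List.insertBy g x acc :=
      pv_insertBy_congr f g x acc (hacc x (by simp))
    have hpw' := (List.pairwise_cons.mp hpw)
    simp only [List.foldl_cons, hx]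
    apply ih
    · intro z hz y hy
      rw [PySem.List.mem_insertBy] at hy
      rcases hy with rfl | hy
      · exact hpw'.1 z hz
      · exact hacc z (by simp [hz]) y hy
    · exact hpw'.2

lemma pv_sorted2_eq_sorted (xs : List (String × Int)) (h : xs.Pairwise (fun a b => a.1 ≠ b.1)) :
    PySem.List.sorted2 xs (fun p => p.1) (fun p => p.2) false
      = PySem.List.sorted xs (fun p => p.1) false := by
  show xs.foldl _ [] = xs.foldl _ []
  apply pv_foldl_insertBy_congr
  · intro x _ y hy; cases hy
  · apply h.imp
    intro a b hab
    by_cases hlt : a.1 < b.1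
    · have : ¬ b.1 < a.1 := not_lt_of_gt hlt
      simp [hlt, this]
    · have : b.1 < a.1 := lt_of_le_of_ne (not_lt.mp hlt) (Ne.symm hab)
      simp [this]

lemma pv_foldl_add_of_mem (l acc : List String) (h : ∀ y ∈ l, y ∈ acc) :
    l.foldl PySem.Set.add acc = acc := by
  induction l generalizing acc with
  | nil => rfl
  | cons y l ih =>
    have hy : PySem.Set.add acc y = acc := by
      simp [PySem.Set.add, h y (by simp)]
    simp only [List.foldl_cons, hy]
    exact ih acc (fun z hz => h z (by simp [hz]))

lemma pv_foldl_add_cons (a : String) :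
    ∀ (l acc : List String), (∀ y ∈ l, y ≠ a) →
      l.foldl PySem.Set.add (a :: acc) = a :: l.foldl PySem.Set.add acc := by
  intro l
  induction l with
  | nil => intro acc _; rfl
  | cons y l ih =>
    intro acc h
    have hy : y ≠ a := h y (by simp)
    have hstep : PySem.Set.add (a :: acc) y = a :: PySem.Set.add acc y := by
      by_cases hm : y ∈ acc
      · simp [PySem.Set.add, hm, hy]
      · simp [PySem.Set.add, hm, hy]
    simp only [List.foldl_cons, hstep]
    exact ih (PySem.Set.add acc y) (fun z hz => h z (by simp [hz]))

lemma pv_ofList_sublist : ∀ (l : List String), (PySem.Set.ofList l).Sublist l := by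
  have key : ∀ (l acc : List String), ∃ u, l.foldl PySem.Set.add acc = acc ++ u ∧ u.Sublist l := by
    intro l
    induction l with
    | nil => intro acc; exact ⟨[], by simp⟩
    | cons x t ih =>
      intro acc
      by_cases hm : x ∈ acc
      · obtain ⟨u, hu, hsub⟩ := ih acc
        refine ⟨u, ?_, hsub.cons x⟩
        simpa [PySem.Set.add, hm] using hu
      · obtain ⟨u, hu, hsub⟩ := ih (acc ++ [x])
        refine ⟨x :: u, ?_, hsub.cons₂ x⟩
        simp only [List.foldl_cons]
        rw [show PySem.Set.add acc x = acc ++ [x] by simp [PySem.Set.add, hm], hu]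
        simp
  intro l
  obtain ⟨u, hu, hsub⟩ := key l []
  simpa [PySem.Set.ofList_eq_foldl, hu] using hsub

lemma pv_dropWhile_ne (x : String) :
    ∀ (t : List String), (x :: t).Pairwise (· ≤ ·) →
      ∀ y ∈ t.dropWhile (fun y => y == x), y ≠ x := by
  intro t
  induction t with
  | nil => intro _ y hy; cases hy
  | cons z t ih =>
    intro hpw y hy
    have h1 := List.pairwise_cons.mp hpw
    have h2 := List.pairwise_cons.mp h1.2
    by_cases hz : z = x
    · subst hz
      rw [List.dropWhile_cons_of_pos (by simp)] at hy
      exact ih (List.pairwise_cons.mpr ⟨h2.1, h2.2⟩) y hy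
    · rw [List.dropWhile_cons_of_neg (by simp [hz])] at hy
      have hxz : x < z := lt_of_le_of_ne (h1.1 z (by simp)) (Ne.symm hz)
      rcases List.mem_cons.mp hy with rfl | hy'
      · exact hz
      · intro hyx; subst hyx
        exact absurd (h2.1 y hy') (not_le_of_gt hxz)

lemma pv_runs_spec :
    ∀ (s : List String), s.Pairwise (· ≤ ·) →
      pvRunsB s = (PySem.Set.ofList s).map (fun k => pvFmt k ((s.count k : Nat) : Int)) := by
  intro s
  induction s using pvRunsB.induct with
  | case1 => intro _; simp [pvRunsB]
  | case2 x t ih =>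
    intro hs
    have hpair := List.pairwise_cons.mp hs
    have htpw : t.Pairwise (· ≤ ·) := hpair.2
    have htw : ∀ y ∈ t.takeWhile (fun y => y == x), y = x := by
      intro y hy
      have := List.mem_takeWhile_imp hy
      simpa using this
    have hdw_ne : ∀ y ∈ t.dropWhile (fun y => y == x), y ≠ x := pv_dropWhile_ne x t hs
    have hdwpw : (t.dropWhile (fun y => y == x)).Pairwise (· ≤ ·) :=
      List.Pairwise.sublist (List.dropWhile_sublist _) htpw
    have hsplit : t.takeWhile (fun y => y == x) ++ t.dropWhile (fun y => y == x) = t :=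
      List.takeWhile_append_dropWhile
    -- the distinct elements of x :: t, in order
    have hofl : PySem.Set.ofList (x :: t) = x :: PySem.Set.ofList (t.dropWhile (fun y => y == x)) := by
      rw [PySem.Set.ofList_eq_foldl, PySem.Set.ofList_eq_foldl]
      have h0 : PySem.Set.add [] x = [x] := by simp [PySem.Set.add]
      rw [List.foldl_cons, h0]
      conv_lhs => rw [← hsplit]
      rw [List.foldl_append,
        pv_foldl_add_of_mem _ [x] (by intro y hy; simp [htw y hy]),
        pv_foldl_add_cons x _ [] hdw_ne]
    -- counts
    have hcx : ((x :: t).count x : Int) = 1 + ((t.takeWhile (fun y => y == x)).length : Int) := by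
      have h1 : (t.takeWhile (fun y => y == x)).count x = (t.takeWhile (fun y => y == x)).length :=
        List.count_eq_length.mpr (by intro b hb; simp [htw b hb])
      have h2 : (t.dropWhile (fun y => y == x)).count x = 0 :=
        List.count_eq_zero.mpr (by intro hmem; exact hdw_ne x hmem rfl)
      have h3 : (x :: t).count x = t.count x + 1 := by simp
      have h4 : t.count x = (t.takeWhile (fun y => y == x)).length := by
        conv_lhs => rw [← hsplit]
        rw [List.count_append, h1, h2]
        omega
      rw [h3, h4]
      push_cast
      ring
    have hck : ∀ k ∈ PySem.Set.ofList (t.dropWhile (fun y => y == x)),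
        (t.dropWhile (fun y => y == x)).count k = (x :: t).count k := by
      intro k hk
      have hkdw : k ∈ t.dropWhile (fun y => y == x) := (PySem.Set.mem_ofList _ _).mp hk
      have hkx : k ≠ x := hdw_ne k hkdw
      have h1 : (t.takeWhile (fun y => y == x)).count k = 0 :=
        List.count_eq_zero.mpr (by intro hmem; exact hkx (htw k hmem))
      have h2 : t.count k = (t.dropWhile (fun y => y == x)).count k := by
        conv_lhs => rw [← hsplit]
        rw [List.count_append, h1]
        omega
      rw [show (x :: t).count k = t.count k by simp [Ne.symm hkx]]
      exact h2.symm
    rw [pvRunsB, hofl, List.map_cons]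
    congr 1
    · show pvFmt x (1 + ((t.takeWhile (fun y => y == x)).length : Int)) = _
      rw [hcx]
    · rw [ih hdwpw]
      exact List.map_congr_left (by intro k hk; rw [← hck k hk])

lemma pv_lookup_isSome (a : List (String × String))
    (h : a.any (fun p => p.1 == "room_type") = true) : (pvLookup a).isSome := by
  unfold pvLookup
  induction a with
  | nil => simp at h
  | cons p rest ih =>
    rw [PySem.Dict.get?_mk_cons]
    by_cases hp : p.1 == "room_type"
    · simp [hp]
    · simp only [List.any_cons, hp, Bool.false_or] at h
      simpa [hp] using ih h

-- ===== VERDICT (by name: the statement is the Claim_ definition above) =====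
theorem generate_room_summary_spec : Claim_equal_generate_room_summary := by
  intro assignments _ hpre
  unfold Spec_generate_room_summary generate_room_summary generate_room_summary_alt
  have hsome : ∀ a ∈ assignments, (pvLookup a).isSome := by
    intro a ha
    exact pv_lookup_isSome a (by simpa using (List.all_eq_true.mp hpre a ha))
  have hA := pv_bindfold (fun (d : PySem.Dict String Int) rt => d.insert rt (d.getD rt 0 + 1))
    assignments PySem.Dict.empty hsome
  have hB := pv_bindfold (fun (l : List String) rt => l ++ [rt]) assignments [] hsome
  simp only [hA, hB]
  set types := assignments.map (fun a => (pvLookup a).getD "") with htypes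
  have hBtypes : types.foldl (fun l rt => l ++ [rt]) [] = types := by
    simpa using PySem.List.foldl_append_singleton_eq_self types []
  have hAcounts : types.foldl (fun d x => d.insert x (d.getD x 0 + 1)) PySem.Dict.empty
      = PySem.Dict.counter types := PySem.Dict.foldl_insert_getD_add_one_eq_counter types
  rw [hBtypes, hAcounts]
  -- the common sorted list of distinct room types
  have hpw_ne : (PySem.Dict.counter types).items.Pairwise (fun a b => a.1 ≠ b.1) := by
    have h := PySem.Dict.nodup_keys_counter types
    have h2 : ((PySem.Dict.counter types).items.map (fun p => p.1)).Nodup := h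
    rw [List.nodup_iff_pairwise_ne] at h2
    exact (List.pairwise_map.mp h2)
  rw [pv_sorted2_eq_sorted _ hpw_ne]
  have hA_sorted : PySem.List.sorted (PySem.Dict.counter types).items (fun p => p.1)
      = (PySem.List.sorted (PySem.Set.ofList types) (fun x => x)).map
          (fun k => (k, (types.count k : Int))) := by
    apply PySem.List.sorted_eq_of_perm_of_pairwise_lt
    · rw [PySem.Dict.items_counter]
      exact (PySem.List.sorted_perm (PySem.Set.ofList types) (fun x => x) false).map _
    · have := PySem.List.sorted_ofList_pairwise_lt types
      exact List.pairwise_map.mpr (this.imp (fun h => h))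
  rw [hA_sorted]
  have hfold : ((PySem.List.sorted (PySem.Set.ofList types) (fun x => x)).map
        (fun k => (k, (types.count k : Int)))).foldl
      (fun acc p =>
        if p.2 == 1 then acc ++ ["1 " ++ p.1]
        else acc ++ [PySem.Int.toStr p.2 ++ " " ++ p.1 ++ "s"]) []
      = (PySem.List.sorted (PySem.Set.ofList types) (fun x => x)).map
          (fun k => pvFmt k (types.count k : Int)) := by
    rw [PySem.List.foldl_congr_mem _ _ (fun acc (p : String × Int) => acc ++ [pvFmt p.1 p.2]) _
      (by intro acc p _; by_cases h : p.2 == 1 <;> simp [pvFmt, h])]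
    rw [PySem.List.foldl_append_singleton_eq_map (fun p : String × Int => pvFmt p.1 p.2)]
    simp [List.map_map, Function.comp]
  rw [hfold]
  -- B side
  have hSpw : (PySem.List.sorted types (fun x => x)).Pairwise (· ≤ ·) :=
    PySem.List.sorted_pairwise types (fun x => x)
  rw [pv_runs_spec _ hSpw]
  have hS_perm : (PySem.List.sorted types (fun x => x)).Perm types :=
    PySem.List.sorted_perm types (fun x => x) false
  have hofl_eq : PySem.Set.ofList (PySem.List.sorted types (fun x => x))
      = PySem.List.sorted (PySem.Set.ofList types) (fun x => x) := by
    apply List.Perm.eq_of_pairwise (le := fun a b : String => a ≤ b)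
      (fun a b _ _ h1 h2 => le_antisymm h1 h2)
    · exact List.Pairwise.sublist (pv_ofList_sublist _) hSpw
    · exact (PySem.List.sorted_ofList_pairwise_lt types).imp le_of_lt
    · rw [List.perm_ext_iff_of_nodup (PySem.Set.nodup_ofList _)
        ((PySem.List.sorted_perm (PySem.Set.ofList types) (fun x => x) false).nodup_iff.mpr
          (PySem.Set.nodup_ofList types))]
      intro a
      rw [PySem.Set.mem_ofList, PySem.List.mem_sorted, PySem.List.mem_sorted,
        PySem.Set.mem_ofList]
  rw [hofl_eq]
  congr 1
  apply List.map_congr_left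
  intro k _
  rw [hS_perm.count_eq]
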